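-- pv_equiv track=rewrite | github.com/saltymermaid/aoc_2024 | advent4a.py | get_diag
-- ===== SOURCE A (Python) =====
-- def get_diag(row, col, grid, right = True):
--     height, width = len(grid), len(grid[0])
--     diag = []
--     while 0 <= row < height and 0 <= col < width:
--         diag.append(grid[row][col])
--         row += 1
--         col = col + 1 if right else col - 1
--     return diag
-- ===== SOURCE B (Python) =====
-- def get_diag(row, col, grid, right = True):
--     height, width = len(grid), len(grid[0])
--     if row < 0 or col < 0 or row >= height or col >= width:
--         return []
--     n = min(height - row, width - col if right else col + 1)
--     return [grid[row + i][col + (i if right else -i)] for i in range(n)]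
-- ===== Notes on version B (the rewrite author's own statement) =====
-- stated objective: alternative
-- what changed: B computes the diagonal length in closed form from the geometry (clamped to 0 for an out-of-range start) and builds the result with a single indexed comprehension, instead of A's while loop that re-tests both bounds and mutates row/col each iteration.
import Mathlib
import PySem

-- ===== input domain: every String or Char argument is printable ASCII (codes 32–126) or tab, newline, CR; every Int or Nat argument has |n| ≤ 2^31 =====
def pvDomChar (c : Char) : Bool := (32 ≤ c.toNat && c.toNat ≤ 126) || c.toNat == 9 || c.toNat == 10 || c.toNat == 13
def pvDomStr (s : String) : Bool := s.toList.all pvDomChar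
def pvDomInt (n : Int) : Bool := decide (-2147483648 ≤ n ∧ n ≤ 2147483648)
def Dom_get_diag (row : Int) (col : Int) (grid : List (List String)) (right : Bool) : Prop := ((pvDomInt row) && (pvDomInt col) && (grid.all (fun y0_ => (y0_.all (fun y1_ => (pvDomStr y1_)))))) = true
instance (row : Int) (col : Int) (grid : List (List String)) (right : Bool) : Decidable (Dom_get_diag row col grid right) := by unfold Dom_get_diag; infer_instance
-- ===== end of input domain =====

-- B replaces A's bounds-retesting while loop by a closed-form diagonal length plus one indexed comprehension; same cost, different decomposition.

-- ===== PORT A =====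
-- A's while loop: condition tested before each access, row incremented, col stepped by ±1.
def diagLoopA (grid : List (List String)) (right : Bool) (height width : Int) (row col : Int) : List String :=
  if h : 0 ≤ row ∧ row < height ∧ 0 ≤ col ∧ col < width then
    (PySem.List.pyGet? ((PySem.List.pyGet? grid row).getD []) col).getD "" ::
      diagLoopA grid right height width (row + 1) (if right then col + 1 else col - 1)
  else []
termination_by (height - row).toNat
decreasing_by omega

def get_diag (row : Int) (col : Int) (grid : List (List String)) (right : Bool) : List String :=
  -- len(grid[0]): Python raises IndexError on the empty grid; excluded by Pre_get_diag (junk default [])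
  diagLoopA grid right (grid.length : Int)
    (((PySem.List.pyGet? grid 0).getD []).length : Int) row col

-- ===== PORT B =====
def get_diag_alt (row : Int) (col : Int) (grid : List (List String)) (right : Bool) : List String :=
  -- len(grid[0]): Python raises IndexError on the empty grid; excluded by Pre_get_diag (junk default [])
  let height : Int := grid.length
  let width : Int := (((PySem.List.pyGet? grid 0).getD []).length : Int)
  if row < 0 ∨ col < 0 ∨ height ≤ row ∨ width ≤ col then []
  else
    let n : Int := min (height - row) (if right then width - col else col + 1)
    (List.range n.toNat).map (fun (i : Nat) =>
      (PySem.List.pyGet? ((PySem.List.pyGet? grid (row + (i : Int))).getD [])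
        (col + (if right then (i : Int) else -(i : Int)))).getD "")

-- ===== PRECONDITION & SPEC =====
-- closed-form count of diagonal cells starting at (row, col)
def diagN (row col height width : Int) (right : Bool) : Nat :=
  if row < 0 ∨ col < 0 ∨ height ≤ row ∨ width ≤ col then 0
  else (min (height - row) (if right then width - col else col + 1)).toNat

-- Pre_ excludes exactly the inputs where Python A raises IndexError: the empty grid
-- (len(grid[0])) and ragged grids where a visited row is shorter than the accessed column.
def Pre_get_diag (row : Int) (col : Int) (grid : List (List String)) (right : Bool) : Prop :=
  grid ≠ [] ∧
  ∀ i ∈ List.range (diagN row col (grid.length : Int) (((PySem.List.pyGet? grid 0).getD []).length : Int) right),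
    (col + (if right then (i : Int) else -(i : Int))) <
      (((PySem.List.pyGet? grid (row + (i : Int))).getD []).length : Int)

instance (row : Int) (col : Int) (grid : List (List String)) (right : Bool) : Decidable (Pre_get_diag row col grid right) := by unfold Pre_get_diag; infer_instance

def pvWitness_get_diag : Int × Int × List (List String) × Bool :=
  (0, 1, [["a", "b"], ["c", "d"]], true)

def Spec_get_diag (row : Int) (col : Int) (grid : List (List String)) (right : Bool) (out : List String) : Prop := out = get_diag_alt row col grid right
instance (row : Int) (col : Int) (grid : List (List String)) (right : Bool) (out : List String) : Decidable (Spec_get_diag row col grid right out) := by unfold Spec_get_diag; infer_instance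

-- ===== CLAIM (what is proved, stated in full; the proofs are below) =====
def Claim_equal_get_diag : Prop := ∀ (row : Int) (col : Int) (grid : List (List String)) (right : Bool), Dom_get_diag row col grid right → Pre_get_diag row col grid right → Spec_get_diag row col grid right (get_diag row col grid right)

-- ===== LEMMAS AND PROOFS =====

-- The loop visits exactly the closed-form count of cells, in order.
theorem diagLoopA_eq_map (grid : List (List String)) (right : Bool) (height width : Int) :
    ∀ (m : Nat) (row col : Int), 0 ≤ row → row < height → 0 ≤ col → col < width →
      (min (height - row) (if right then width - col else col + 1)).toNat = m →
      diagLoopA grid right height width row col =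
        (List.range m).map (fun (i : Nat) =>
          (PySem.List.pyGet? ((PySem.List.pyGet? grid (row + (i : Int))).getD [])
            (col + (if right then (i : Int) else -(i : Int)))).getD "") := by
  intro m
  induction m with
  | zero =>
    intro row col h1 h2 h3 h4 hm
    exfalso
    cases right <;> simp only [if_true, if_false, Bool.false_eq_true] at hm <;> omega
  | succ m ih =>
    intro row col h1 h2 h3 h4 hm
    rw [diagLoopA, dif_pos ⟨h1, h2, h3, h4⟩, List.range_succ_eq_map, List.map_cons,
      List.map_map]
    congr 1
    · simp
    · cases m with
      | zero =>
        rw [diagLoopA, dif_neg]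
        · simp
        · cases right <;>
            simp only [if_true, if_false, Bool.false_eq_true, not_and, not_lt] at hm ⊢ <;>
            intro _ _ _ <;> omega
      | succ m' =>
        have hrow : row + 1 < height := by
          cases right <;> simp only [if_true, if_false, Bool.false_eq_true] at hm <;> omega
        have hcol1 : 0 ≤ (if right then col + 1 else col - 1) := by
          cases right <;> simp only [if_true, if_false, Bool.false_eq_true] at hm ⊢ <;> omega
        have hcol2 : (if right then col + 1 else col - 1) < width := by
          cases right <;> simp only [if_true, if_false, Bool.false_eq_true] at hm ⊢ <;> omega
        have hm' : (min (height - (row + 1))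
            (if right then width - (if right then col + 1 else col - 1)
             else (if right then col + 1 else col - 1) + 1)).toNat = m' + 1 := by
          cases right <;> simp only [if_true, if_false, Bool.false_eq_true] at hm ⊢ <;> omega
        rw [ih (row + 1) (if right then col + 1 else col - 1) (by omega) hrow hcol1 hcol2 hm']
        apply List.map_congr_left
        intro i _
        cases right <;> simp only [if_true, if_false, Bool.false_eq_true, Function.comp] <;>
          push_cast <;> ring_nf

-- The two ports agree on every input (even outside Pre_, where both return junk consistently).
theorem get_diag_eq_alt (row col : Int) (grid : List (List String)) (right : Bool) :
    get_diag row col grid right = get_diag_alt row col grid right := by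
  by_cases h : row < 0 ∨ col < 0 ∨ (grid.length : Int) ≤ row ∨
      (((PySem.List.pyGet? grid 0).getD []).length : Int) ≤ col
  · simp only [get_diag, get_diag_alt, if_pos h]
    rw [diagLoopA, dif_neg (by omega)]
  · simp only [get_diag, get_diag_alt, if_neg h]
    push Not at h
    refine diagLoopA_eq_map _ _ _ _ _ row col ?_ ?_ ?_ ?_ rfl <;> omega

-- ===== VERDICT (by name: the statement is the Claim_ definition above) =====
theorem get_diag_spec : Claim_equal_get_diag := by
  intro row col grid right _ _
  exact get_diag_eq_alt row col grid right
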